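-- pv_equiv track=rewrite | github.com/siddhant230/extra | ISL/backend.py | final_process
-- ===== SOURCE A (Python) =====
-- def final_process(all_sigml):
--   ind_dic={}
--   tags=[]
--   class_num=0
--
--   for each_sigml in all_sigml:
--     for each_tag in each_sigml:
--
--       if len(tags)==0:
--         tags.append(each_tag)
--         ind_dic[each_tag] = class_num
--
--       else:
--         if each_tag in ind_dic:
--           if ind_dic[each_tag] == class_num:
--             tags.append(each_tag)
--             ind_dic[each_tag] = class_num
--         else:
--           tags.append(each_tag)
--           ind_dic[each_tag] = class_num
--
--     class_num+=1
--   return tags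
-- ===== SOURCE B (Python) =====
-- def final_process(all_sigml):
--     def go(groups, earlier):
--         if not groups:
--             return []
--         group = groups[0]
--         kept = [tag for tag in group if all(tag not in e for e in earlier)]
--         return kept + go(groups[1:], earlier + [group])
--     return go(all_sigml, [])
-- ===== Notes on version B (the rewrite author's own statement) =====
-- stated objective: alternative
-- what changed: Replaces A's single stateful pass with a dict of first-group indices by a stateless recursion on the group list: each group's kept tags are computed by rescanning the accumulated list of earlier groups for membership, and the output is built by concatenation of per-group filters.
import Mathlib
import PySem

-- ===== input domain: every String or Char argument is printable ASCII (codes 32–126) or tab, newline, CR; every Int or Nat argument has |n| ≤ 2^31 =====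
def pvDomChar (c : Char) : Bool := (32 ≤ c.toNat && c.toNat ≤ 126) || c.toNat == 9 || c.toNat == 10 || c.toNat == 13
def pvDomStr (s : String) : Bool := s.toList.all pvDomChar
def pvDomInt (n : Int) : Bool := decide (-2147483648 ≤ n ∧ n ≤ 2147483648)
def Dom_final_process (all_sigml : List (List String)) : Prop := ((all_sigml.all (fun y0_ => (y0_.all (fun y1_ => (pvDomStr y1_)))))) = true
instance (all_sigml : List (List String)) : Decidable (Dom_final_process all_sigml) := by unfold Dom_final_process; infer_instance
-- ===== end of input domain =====

-- B replaces A's stateful pass with its dict of first-group indices by a stateless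
-- recursion on the group list that rescans the earlier groups for membership (alternative).

-- ===== PORT A =====
-- State: (ind_dic, tags, class_num). Body of A's inner loop, step for step.
def fpStepA (st : PySem.Dict String Int × List String × Int) (each_tag : String) :
    PySem.Dict String Int × List String × Int :=
  if st.2.1.length = 0 then
    (st.1.insert each_tag st.2.2, st.2.1 ++ [each_tag], st.2.2)
  else
    match st.1.get? each_tag with          -- 'each_tag in ind_dic' then 'ind_dic[each_tag]'
    | some v =>
        if v = st.2.2 then (st.1.insert each_tag st.2.2, st.2.1 ++ [each_tag], st.2.2)
        else st
    | none => (st.1.insert each_tag st.2.2, st.2.1 ++ [each_tag], st.2.2)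

-- Outer loop body: run the inner loop over one group, then class_num += 1.
def fpGroupA (st : PySem.Dict String Int × List String × Int) (each_sigml : List String) :
    PySem.Dict String Int × List String × Int :=
  let st2 := each_sigml.foldl fpStepA st
  (st2.1, st2.2.1, st2.2.2 + 1)

def final_process (all_sigml : List (List String)) : List String :=
  (all_sigml.foldl fpGroupA (PySem.Dict.empty, ([] : List String), (0 : Int))).2.1

-- ===== PORT B =====
-- Recursive 'go(groups, earlier)': kept = comprehension filtering the head group by
-- 'all(tag not in e for e in earlier)'; recurse on the tail with earlier + [group].
def fpGo (groups earlier : List (List String)) : List String :=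
  match groups with
  | [] => []
  | group :: rest =>
      (group.filter (fun tag => earlier.all (fun e => !e.contains tag)))
        ++ fpGo rest (earlier ++ [group])

def final_process_alt (all_sigml : List (List String)) : List String :=
  fpGo all_sigml []

-- ===== PRECONDITION & SPEC =====
def Spec_final_process (all_sigml : List (List String)) (out : List String) : Prop := out = final_process_alt all_sigml
instance (all_sigml : List (List String)) (out : List String) : Decidable (Spec_final_process all_sigml out) := by unfold Spec_final_process; infer_instance

-- ===== CLAIM (what is proved, stated in full; the proofs are below) =====
def Claim_equal_final_process : Prop := ∀ (all_sigml : List (List String)), Dom_final_process all_sigml → Spec_final_process all_sigml (final_process all_sigml)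

-- ===== LEMMAS AND PROOFS =====

-- Inner-loop invariant for one group of A (class_num = cn fixed): with 'p t' meaning
-- 't was seen in a strictly earlier group', A appends exactly the tags with p t = false,
-- its dict keys grow by the group's tags, values stay ≤ cn, a key implies nonempty tags.
lemma fp_inner (cn : Int) (p : String → Bool) :
    ∀ (g : List String) (d : PySem.Dict String Int) (tags : List String),
    (∀ t, d.get? t = some cn ↔ ((d.get? t).isSome ∧ p t = false)) →
    (∀ t, p t = true → (d.get? t).isSome) →
    (∀ t, (d.get? t).isSome → tags ≠ []) →
    (∀ t v, d.get? t = some v → v ≤ cn) →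
    (g.foldl fpStepA (d, tags, cn)).2.2 = cn ∧
    (g.foldl fpStepA (d, tags, cn)).2.1 = tags ++ g.filter (fun t => !p t) ∧
    (∀ t, ((g.foldl fpStepA (d, tags, cn)).1.get? t).isSome ↔ ((d.get? t).isSome ∨ t ∈ g)) ∧
    (∀ t, ((g.foldl fpStepA (d, tags, cn)).1.get? t).isSome →
        (g.foldl fpStepA (d, tags, cn)).2.1 ≠ []) ∧
    (∀ t v, (g.foldl fpStepA (d, tags, cn)).1.get? t = some v → v ≤ cn) := by
  intro g
  induction g with
  | nil =>
      intro d tags h1 h2 h3 h4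
      exact ⟨rfl, by simp, fun t => by simp, h3, h4⟩
  | cons x g ih =>
      intro d tags h1 h2 h3 h4
      by_cases hx : p x = true
      · -- seen in an earlier group: A skips x, the filter drops x
        have hsome : (d.get? x).isSome := h2 x hx
        obtain ⟨v, hv⟩ := Option.isSome_iff_exists.mp hsome
        have hne : tags ≠ [] := h3 x hsome
        have hvne : v ≠ cn := by
          intro h; subst h
          have := ((h1 x).mp hv).2
          simp [hx] at this
        have hstepA : fpStepA (d, tags, cn) x = (d, tags, cn) := by
          simp [fpStepA, List.length_eq_zero_iff, hne, hv, hvne]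
        rw [List.foldl_cons, hstepA]
        obtain ⟨c1, c2, c3, c4, c5⟩ := ih d tags h1 h2 h3 h4
        refine ⟨c1, ?_, fun t => ?_, c4, c5⟩
        · rw [c2]; simp [hx]
        · rw [c3 t]
          simp only [List.mem_cons]
          constructor
          · rintro (h | h)
            · exact Or.inl h
            · exact Or.inr (Or.inr h)
          · rintro (h | heq | h)
            · exact Or.inl h
            · exact Or.inl (heq ▸ hsome)
            · exact Or.inr h
      · -- not seen before: A appends x and records it at index cn, the filter keeps x
        have hx' : p x = false := by revert hx; cases p x <;> simp
        have hstepA : fpStepA (d, tags, cn) x = (d.insert x cn, tags ++ [x], cn) := by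
          by_cases hlen : tags.length = 0
          · simp [fpStepA, hlen]
          · cases hv : d.get? x with
            | none => simp [fpStepA, hlen, hv]
            | some v =>
                have : v = cn := by
                  have := (h1 x).mpr ⟨by simp [hv], hx'⟩
                  rw [hv] at this; exact Option.some_inj.mp this
                simp [fpStepA, hlen, hv, this]
        rw [List.foldl_cons, hstepA]
        have h1' : ∀ t, (d.insert x cn).get? t = some cn ↔
            (((d.insert x cn).get? t).isSome ∧ p t = false) := by
          intro t
          by_cases ht : t = x
          · subst ht; simp [PySem.Dict.get?_insert_self, hx']
          · rw [PySem.Dict.get?_insert_of_ne d cn ht]; exact h1 t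
        have h2' : ∀ t, p t = true → ((d.insert x cn).get? t).isSome := by
          intro t ht
          by_cases htx : t = x
          · subst htx; simp [PySem.Dict.get?_insert_self]
          · rw [PySem.Dict.get?_insert_of_ne d cn htx]; exact h2 t ht
        have h3' : ∀ t, ((d.insert x cn).get? t).isSome → tags ++ [x] ≠ [] := by
          intro t _; simp
        have h4' : ∀ t v, (d.insert x cn).get? t = some v → v ≤ cn := by
          intro t v hv
          by_cases htx : t = x
          · subst htx; rw [PySem.Dict.get?_insert_self] at hv
            simp at hv; omega
          · rw [PySem.Dict.get?_insert_of_ne d cn htx] at hv; exact h4 t v hv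
        obtain ⟨c1, c2, c3, c4, c5⟩ := ih (d.insert x cn) (tags ++ [x]) h1' h2' h3' h4'
        refine ⟨c1, ?_, ?_, c4, c5⟩
        · rw [c2]; simp [hx']
        · intro t
          rw [c3 t]
          by_cases htx : t = x
          · subst htx; simp [PySem.Dict.get?_insert_self]
          · rw [PySem.Dict.get?_insert_of_ne d cn htx]
            simp [List.mem_cons, htx]

-- Outer invariant: A's tag list from a state whose dict keys are exactly the tags
-- occurring in 'earlier' (all values < class_num) equals tags ++ fpGo gs earlier.
lemma fp_outer :
    ∀ (gs : List (List String)) (d : PySem.Dict String Int) (tags : List String)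
      (cn : Int) (earlier : List (List String)),
    (∀ t, (d.get? t).isSome ↔ earlier.any (fun e => e.contains t) = true) →
    (∀ t, (d.get? t).isSome → tags ≠ []) →
    (∀ t v, d.get? t = some v → v < cn) →
    (gs.foldl fpGroupA (d, tags, cn)).2.1 = tags ++ fpGo gs earlier := by
  intro gs
  induction gs with
  | nil => intro d tags cn earlier _ _ _; simp [fpGo]
  | cons g gs ih =>
      intro d tags cn earlier hk hne hlt
      set p : String → Bool := fun t => earlier.any (fun e => e.contains t) with hp
      have h1 : ∀ t, d.get? t = some cn ↔ ((d.get? t).isSome ∧ p t = false) := by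
        intro t
        constructor
        · intro h; exact absurd (hlt t cn h) (lt_irrefl cn)
        · rintro ⟨hs, hns⟩
          have h' := (hk t).mp hs
          simp only [hp] at hns
          rw [h'] at hns
          cases hns
      have h2 : ∀ t, p t = true → (d.get? t).isSome := fun t ht => (hk t).mpr ht
      have h4 : ∀ t v, d.get? t = some v → v ≤ cn := fun t v hv => le_of_lt (hlt t v hv)
      obtain ⟨c1, c2, c3, c4, c5⟩ := fp_inner cn p g d tags h1 h2 hne h4
      set st2 := g.foldl fpStepA (d, tags, cn) with hst2
      have hfilter : g.filter (fun t => !p t)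
          = g.filter (fun tag => earlier.all (fun e => !e.contains tag)) := by
        apply List.filter_congr
        intro t _
        simp [hp, List.any_eq_not_all_not]
      have hkeys : ∀ t, (st2.1.get? t).isSome ↔
          ((earlier ++ [g]).any (fun e => e.contains t)) = true := by
        intro t
        rw [c3 t, hk t]
        simp [List.any_append]
      have hrec := ih st2.1 st2.2.1 (st2.2.2 + 1) (earlier ++ [g]) hkeys c4
        (by intro t v hv; have := c5 t v hv; rw [c1]; omega)
      rw [List.foldl_cons]
      have hstate : fpGroupA (d, tags, cn) g = (st2.1, st2.2.1, st2.2.2 + 1) := rfl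
      rw [hstate, hrec, c2, hfilter, fpGo, List.append_assoc]

-- ===== VERDICT (by name: the statement is the Claim_ definition above) =====
theorem final_process_spec : Claim_equal_final_process := by
  intro all_sigml _
  unfold Spec_final_process final_process final_process_alt
  have := fp_outer all_sigml PySem.Dict.empty [] 0 []
    (by intro t; simp [PySem.Dict.get?_empty])
    (by intro t h; simp [PySem.Dict.get?_empty] at h)
    (by intro t v h; simp [PySem.Dict.get?_empty] at h)
  simpa using this
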